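-- pv_equiv track=rewrite | github.com/tarunyadav0204/Astrology | backend/calculators/vargottama_calculator.py | _calculate_vargottama_strength
-- ===== SOURCE A (Python) =====
-- def _calculate_vargottama_strength(vargottama_charts):
--     """Calculate strength based on number and importance of charts"""
--     chart_weights = {
--         'D1': 3,    # Rashi - most important
--         'D9': 3,    # Navamsa - equally important
--         'D10': 2,   # Dasamsa - career
--         'D12': 1,   # Dwadasamsa - parents
--         'D16': 2,   # Shodasamsa - vehicles
--         'D20': 1,   # Vimsamsa - spiritual
--         'D24': 1,   # Chaturvimsamsa - learning
--         'D27': 1,   # Nakshatramsa - strengths/weaknesses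
--         'D30': 1,   # Trimsamsa - evils
--         'D60': 2    # Shashtiamsa - general
--     }
--
--     total_weight = sum(chart_weights.get(chart, 1) for chart in vargottama_charts)
--
--     if total_weight >= 8:
--         return 'Exceptional'
--     elif total_weight >= 6:
--         return 'Very Strong'
--     elif total_weight >= 4:
--         return 'Strong'
--     elif total_weight >= 2:
--         return 'Moderate'
--     else:
--         return 'Weak'
-- ===== SOURCE B (Python) =====
-- def _calculate_vargottama_strength(vargottama_charts):
--     """Calculate strength based on number and importance of charts"""
--     chart_weights = {
--         'D1': 3, 'D9': 3, 'D10': 2, 'D12': 1, 'D16': 2,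
--         'D20': 1, 'D24': 1, 'D27': 1, 'D30': 1, 'D60': 2
--     }
--     # pass 1: count occurrences of each chart (no weight lookups here)
--     counts = {}
--     for chart in vargottama_charts:
--         counts[chart] = counts.get(chart, 0) + 1
--     # pass 2: iterate over the FIXED weight table; unknown charts contribute
--     # their base weight 1 via len(), known charts add (weight - 1) per copy
--     total = len(vargottama_charts)
--     for key, weight in chart_weights.items():
--         total += counts.get(key, 0) * (weight - 1)
--     # label: scan a threshold table instead of an if-elif ladder
--     for threshold, label in [(8, 'Exceptional'), (6, 'Very Strong'),
--                              (4, 'Strong'), (2, 'Moderate')]: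
--         if total >= threshold:
--             return label
--     return 'Weak'
-- ===== Notes on version B (the rewrite author's own statement) =====
-- stated objective: alternative
-- what changed: B replaces A's per-element weighted sum by a two-stage computation: it builds an occurrence counter of the input in one pass with no weight lookups, then derives the total from a pass over the fixed 10-entry weight table (len + count*(weight-1)), and picks the label by scanning a threshold table instead of the if-elif ladder.
import Mathlib
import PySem

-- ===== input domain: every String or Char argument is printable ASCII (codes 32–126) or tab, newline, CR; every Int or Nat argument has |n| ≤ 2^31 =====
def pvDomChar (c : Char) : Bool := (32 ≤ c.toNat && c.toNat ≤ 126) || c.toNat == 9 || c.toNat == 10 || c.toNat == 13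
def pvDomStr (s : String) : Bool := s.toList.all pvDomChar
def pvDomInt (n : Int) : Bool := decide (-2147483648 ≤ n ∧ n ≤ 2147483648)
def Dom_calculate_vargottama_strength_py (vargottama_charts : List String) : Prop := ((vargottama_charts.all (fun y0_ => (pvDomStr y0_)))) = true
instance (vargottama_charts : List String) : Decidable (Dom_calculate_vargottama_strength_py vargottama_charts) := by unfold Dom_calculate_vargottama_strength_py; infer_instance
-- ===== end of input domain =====

-- B builds an occurrence counter of the input first, then derives the total from a pass over the fixed weight table and picks the label by scanning a threshold table (objective: alternative; same cost, different staging).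


-- ===== PORT A =====
def calculate_vargottama_strength_py (vargottama_charts : List String) : String :=
  let chart_weights : PySem.Dict String Int := PySem.Dict.ofList
    [("D1", 3), ("D9", 3), ("D10", 2), ("D12", 1), ("D16", 2),
     ("D20", 1), ("D24", 1), ("D27", 1), ("D30", 1), ("D60", 2)]
  let total_weight : Int :=
    vargottama_charts.foldl (fun acc chart => acc + chart_weights.getD chart 1) 0
  if total_weight ≥ 8 then "Exceptional"
  else if total_weight ≥ 6 then "Very Strong"
  else if total_weight ≥ 4 then "Strong"
  else if total_weight ≥ 2 then "Moderate"
  else "Weak"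

-- ===== PORT B =====
-- Source B's 'for threshold, label in …: if total >= threshold: return label' loop (ends with 'Weak')
def pickLabel : List (Int × String) → Int → String
  | [], _ => "Weak"
  | (threshold, label) :: rest, total =>
      if total ≥ threshold then label else pickLabel rest total

def calculate_vargottama_strength_py_alt (vargottama_charts : List String) : String :=
  let chart_weights : PySem.Dict String Int := PySem.Dict.ofList
    [("D1", 3), ("D9", 3), ("D10", 2), ("D12", 1), ("D16", 2),
     ("D20", 1), ("D24", 1), ("D27", 1), ("D30", 1), ("D60", 2)]
  -- pass 1: counts[chart] = counts.get(chart, 0) + 1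
  let counts : PySem.Dict String Int :=
    vargottama_charts.foldl (fun d chart => d.insert chart (d.getD chart 0 + 1)) PySem.Dict.empty
  -- pass 2: total = len(...); for key, weight in chart_weights.items(): total += counts.get(key, 0) * (weight - 1)
  let total : Int :=
    chart_weights.items.foldl
      (fun acc kw => acc + counts.getD kw.1 0 * (kw.2 - 1))
      (vargottama_charts.length : Int)
  pickLabel [(8, "Exceptional"), (6, "Very Strong"), (4, "Strong"), (2, "Moderate")] total

-- ===== PRECONDITION & SPEC =====
def Spec_calculate_vargottama_strength_py (vargottama_charts : List String) (out : String) : Prop := out = calculate_vargottama_strength_py_alt vargottama_charts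
instance (vargottama_charts : List String) (out : String) : Decidable (Spec_calculate_vargottama_strength_py vargottama_charts out) := by unfold Spec_calculate_vargottama_strength_py; infer_instance

-- ===== CLAIM (what is proved, stated in full; the proofs are below) =====
def Claim_equal_calculate_vargottama_strength_py : Prop := ∀ (vargottama_charts : List String), Dom_calculate_vargottama_strength_py vargottama_charts → Spec_calculate_vargottama_strength_py vargottama_charts (calculate_vargottama_strength_py vargottama_charts)

-- ===== LEMMAS AND PROOFS =====

-- if c is not among the keys of an association list, its delta-sum over the list is 0
lemma delta_sum_zero (l : List (String × Int)) (c : String) (h : c ∉ l.map (·.1)) :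
    (l.map (fun kw => (if kw.1 == c then (1:Int) else 0) * (kw.2 - 1))).sum = 0 := by
  induction l with
  | nil => simp
  | cons kw rest ih =>
    simp only [List.map_cons, List.mem_cons, not_or] at h
    rw [List.map_cons, List.sum_cons, ih h.2,
      if_neg (by simp [beq_iff_eq]; exact fun e => h.1 e.symm), zero_mul, zero_add]

-- over an association list with distinct keys, the delta-sum at c is (lookup c default 1) - 1
lemma delta_sum_eq (l : List (String × Int)) (c : String) (h : (l.map (·.1)).Nodup) :
    (l.map (fun kw => (if kw.1 == c then (1:Int) else 0) * (kw.2 - 1))).sum =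
      (PySem.Dict.mk l).getD c 1 - 1 := by
  induction l with
  | nil => simp [PySem.Dict.getD, PySem.Dict.get?]
  | cons kw rest ih =>
    simp only [List.map_cons, List.nodup_cons] at h
    rw [List.map_cons, List.sum_cons, PySem.Dict.getD, PySem.Dict.get?_mk_cons]
    by_cases hc : kw.1 = c
    · rw [if_pos (by simp [hc]), if_pos (by simp [hc]), delta_sum_zero rest c (hc ▸ h.1)]
      simp
    · rw [if_neg (by simp [hc]), if_neg (by simp [hc]), zero_mul, zero_add, ih h.2]
      rfl

-- B's total (length + fixed-table pass over counts) equals A's per-element weighted sum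
lemma total_eq (l : List (String × Int)) (h : (l.map (·.1)).Nodup) (cs : List String) :
    (cs.length : Int) + (l.map (fun kw => (cs.count kw.1 : Int) * (kw.2 - 1))).sum =
      (cs.map (fun c => (PySem.Dict.mk l).getD c 1)).sum := by
  induction cs with
  | nil => simp
  | cons c rest ih =>
    have hmap : l.map (fun kw => ((c :: rest).count kw.1 : Int) * (kw.2 - 1)) =
        l.map (fun kw => (rest.count kw.1 : Int) * (kw.2 - 1) +
          (if kw.1 == c then (1:Int) else 0) * (kw.2 - 1)) := by
      refine List.map_congr_left (fun kw _ => ?_)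
      rw [List.count_cons]
      by_cases hc : kw.1 = c
      · simp [hc]; ring
      · simp [hc, Ne.symm hc]
    rw [List.map_cons, List.sum_cons, ← ih, hmap, PySem.List.sum_map_add_int,
      delta_sum_eq l c h, List.length_cons]
    push_cast; ring

-- ===== VERDICT (by name: the statement is the Claim_ definition above) =====
theorem calculate_vargottama_strength_py_spec : Claim_equal_calculate_vargottama_strength_py := by
  intro cs _
  unfold Spec_calculate_vargottama_strength_py
  unfold calculate_vargottama_strength_py calculate_vargottama_strength_py_alt
  simp only
  rw [PySem.Dict.foldl_insert_getD_add_one_eq_counter]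
  have hitems : (PySem.Dict.ofList
      [("D1", (3:Int)), ("D9", 3), ("D10", 2), ("D12", 1), ("D16", 2),
       ("D20", 1), ("D24", 1), ("D27", 1), ("D30", 1), ("D60", 2)]).items =
      [("D1", (3:Int)), ("D9", 3), ("D10", 2), ("D12", 1), ("D16", 2),
       ("D20", 1), ("D24", 1), ("D27", 1), ("D30", 1), ("D60", 2)] := by decide
  have hmk : PySem.Dict.ofList
      [("D1", (3:Int)), ("D9", 3), ("D10", 2), ("D12", 1), ("D16", 2),
       ("D20", 1), ("D24", 1), ("D27", 1), ("D30", 1), ("D60", 2)] = PySem.Dict.mk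
      [("D1", (3:Int)), ("D9", 3), ("D10", 2), ("D12", 1), ("D16", 2),
       ("D20", 1), ("D24", 1), ("D27", 1), ("D30", 1), ("D60", 2)] := by decide
  rw [hitems, PySem.List.foldl_add, PySem.List.foldl_add, zero_add]
  simp only [PySem.Dict.getD_counter]
  rw [total_eq _ (by decide) cs, ← hmk]
  generalize (cs.map (fun c => (PySem.Dict.ofList
      [("D1", (3:Int)), ("D9", 3), ("D10", 2), ("D12", 1), ("D16", 2),
       ("D20", 1), ("D24", 1), ("D27", 1), ("D30", 1), ("D60", 2)]).getD c 1)).sum = t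
  simp [pickLabel]
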